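-- pv_equiv track=rewrite | github.com/dtunkelang/y2karaoke | src/y2karaoke/core/whisper_integration.py | _distribute_words_within_segments
-- ===== SOURCE A (Python) =====
-- from typing import List, Optional, Tuple, Dict, Any, Set, Sequence, Iterable
--
-- def _distribute_words_within_segments(
--     line_to_seg: List[int],
--     lrc_lines_words: List[List[Tuple[int, str]]],
--     seg_word_ranges: List[Tuple[int, int]],
-- ) -> Dict[int, List[int]]:
--     """Positionally map LRC words to Whisper words within each segment."""
--     seg_to_lines: Dict[int, List[int]] = {}
--     for li, si in enumerate(line_to_seg):
--         if si >= 0: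
--             seg_to_lines.setdefault(si, []).append(li)
--
--     assignments: Dict[int, List[int]] = {}
--     for si, line_indices in seg_to_lines.items():
--         first_wi, last_wi = seg_word_ranges[si]
--         if first_wi < 0:
--             continue
--         seg_wc = last_wi - first_wi + 1
--         all_lrc: List[int] = []
--         for li in line_indices:
--             for idx, _ in lrc_lines_words[li]:
--                 all_lrc.append(idx)
--         total = len(all_lrc)
--         if total == 0:
--             continue
--         for j, lrc_idx in enumerate(all_lrc):
--             pos = j / max(total, 1)
--             offset = min(int(pos * seg_wc), seg_wc - 1)
--             assignments[lrc_idx] = [first_wi + offset]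
--     return assignments
-- ===== SOURCE B (Python) =====
-- def _distribute_words_within_segments(line_to_seg, lrc_lines_words, seg_word_ranges):
--     """Positionally map LRC words to Whisper words within each segment."""
--     # Different decomposition: no grouping dicts at all.  The ordered list of
--     # segments is dict.fromkeys of the valid entries; each segment re-scans
--     # line_to_seg for its lines; all (lrc_idx, value) pairs are collected in a
--     # flat list and turned into the result dict once at the end (dict(pairs)
--     # keeps first-key order and last value, exactly Python's insert semantics).
--     segs = list(dict.fromkeys(s for s in line_to_seg if s >= 0))
--     pairs = []
--     for si in segs:
--         first_wi, last_wi = seg_word_ranges[si]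
--         if first_wi < 0:
--             continue
--         all_lrc = [idx for li, s in enumerate(line_to_seg) if s == si
--                    for idx, _ in lrc_lines_words[li]]
--         total = len(all_lrc)
--         if total == 0:
--             continue
--         seg_wc = last_wi - first_wi + 1
--         pairs.extend(
--             (lrc_idx, [first_wi + min(int((j / total) * seg_wc), seg_wc - 1)])
--             for j, lrc_idx in enumerate(all_lrc))
--     return dict(pairs)
-- ===== Notes on version B (the rewrite author's own statement) =====
-- stated objective: alternative
-- what changed: B drops both of A's grouping/assignment dicts: it computes the ordered segment list with dict.fromkeys, re-scans line_to_seg per segment to collect that segment's word indices, accumulates all (lrc_idx, value) pairs in one flat list, and builds the result with a single dict(pairs) at the end; this trades A's O(n+w) dict-grouping for an O(S*n+w) per-segment rescan.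
import Mathlib
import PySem

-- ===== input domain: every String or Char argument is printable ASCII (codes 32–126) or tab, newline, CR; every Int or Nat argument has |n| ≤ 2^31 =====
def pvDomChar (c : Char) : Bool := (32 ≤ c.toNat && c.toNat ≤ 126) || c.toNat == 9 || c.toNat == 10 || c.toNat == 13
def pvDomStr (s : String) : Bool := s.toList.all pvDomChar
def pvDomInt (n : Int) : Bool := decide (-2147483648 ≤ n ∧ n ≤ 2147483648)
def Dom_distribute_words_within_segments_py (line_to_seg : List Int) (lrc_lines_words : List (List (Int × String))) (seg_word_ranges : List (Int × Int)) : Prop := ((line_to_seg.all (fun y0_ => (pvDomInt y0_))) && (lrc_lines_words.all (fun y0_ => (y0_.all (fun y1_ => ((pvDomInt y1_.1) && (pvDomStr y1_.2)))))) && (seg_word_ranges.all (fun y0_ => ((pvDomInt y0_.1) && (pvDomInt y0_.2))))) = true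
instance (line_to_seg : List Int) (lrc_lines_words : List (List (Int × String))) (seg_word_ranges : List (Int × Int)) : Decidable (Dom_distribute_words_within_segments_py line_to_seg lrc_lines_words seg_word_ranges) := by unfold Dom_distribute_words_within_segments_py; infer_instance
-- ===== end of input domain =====

-- B replaces A's two grouping dicts by a dict.fromkeys segment list, a per-segment rescan of
-- line_to_seg and one dict(pairs) built at the end (objective: alternative); return value only,
-- no argument is mutated.

-- Shared float model, hand-written (PySem has no float primitives).  pyRound rounds an exact
-- rational to the nearest IEEE-754 double (53-bit significand, ties to even); it is exact for
-- the values arising here, which are far from the overflow and subnormal ranges given |int| ≤ 2^31.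
def pyRound (q : ℚ) : ℚ :=
  if q = 0 then 0
  else
    let s : ℚ := if q < 0 then -1 else 1
    let a : ℚ := |q|
    let e : ℤ := Int.log 2 a
    let m : ℚ := a * (2 : ℚ) ^ ((52 : ℤ) - e)
    let n : ℤ := ⌊m⌋
    let f : ℚ := m - (n : ℚ)
    let n' : ℤ :=
      if (1 : ℚ) / 2 < f then n + 1
      else if f < (1 : ℚ) / 2 then n
      else if n % 2 = 0 then n else n + 1
    s * (n' : ℚ) * (2 : ℚ) ^ (e - 52)

-- Python's int() applied to a (here exactly represented) float: truncation toward zero.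
def pyTruncQ (q : ℚ) : Int := if q < 0 then -⌊-q⌋ else ⌊q⌋

-- int((j / t) * w) with Python float semantics: both operations round to double precision.
def pyDivMulInt (j t w : Int) : Int :=
  pyTruncQ (pyRound (pyRound ((j : ℚ) / (t : ℚ)) * (w : ℚ)))

-- ===== PORT A =====
-- body of 'for li, si in enumerate(line_to_seg): if si >= 0: seg_to_lines.setdefault(si, []).append(li)'
def pvA_line (d : PySem.Dict Int (List Int)) (p : Int × Int) : PySem.Dict Int (List Int) :=
  if 0 ≤ p.2 then d.modify p.2 [] (· ++ [p.1]) else d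

-- body of 'for si, line_indices in seg_to_lines.items(): …'
def pvA_seg (lrc_lines_words : List (List (Int × String))) (seg_word_ranges : List (Int × Int))
    (asg : PySem.Dict Int (List Int)) (p : Int × List Int) : PySem.Dict Int (List Int) :=
  match PySem.List.pyGet? seg_word_ranges p.1 with
  | none => asg          -- IndexError in Python; excluded by Pre_
  | some fl =>
    if fl.1 < 0 then asg
    else
      let seg_wc : Int := fl.2 - fl.1 + 1
      let all_lrc : List Int :=
        p.2.foldl (fun acc li =>
          ((PySem.List.pyGet? lrc_lines_words li).getD []).foldl (fun a w => a ++ [w.1]) acc) []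
          -- .getD []: the none case is an IndexError in Python, excluded by Pre_
      let total : Int := all_lrc.length
      if total = 0 then asg
      else
        (PySem.List.enumerate all_lrc).foldl
          (fun a2 q =>
            let offset : Int := min (pyDivMulInt q.1 (max total 1) seg_wc) (seg_wc - 1)
            a2.insert q.2 [fl.1 + offset]) asg

def distribute_words_within_segments_py (line_to_seg : List Int) (lrc_lines_words : List (List (Int × String))) (seg_word_ranges : List (Int × Int)) : List (Int × List Int) :=
  let seg_to_lines : PySem.Dict Int (List Int) :=
    (PySem.List.enumerate line_to_seg).foldl pvA_line PySem.Dict.empty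
  let assignments : PySem.Dict Int (List Int) :=
    seg_to_lines.items.foldl (pvA_seg lrc_lines_words seg_word_ranges) PySem.Dict.empty
  assignments.items

-- ===== PORT B =====
-- the body of B's 'for si in segs:' loop: the flat pair list this segment contributes
def pvB_pairsOf (line_to_seg : List Int) (lrc_lines_words : List (List (Int × String)))
    (seg_word_ranges : List (Int × Int)) (si : Int) : List (Int × List Int) :=
  match PySem.List.pyGet? seg_word_ranges si with
  | none => []           -- IndexError in Python; excluded by Pre_
  | some fl =>
    if fl.1 < 0 then []
    else
      -- 'all_lrc = [idx for li, s in enumerate(line_to_seg) if s == si for idx, _ in lrc_lines_words[li]]'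
      let all_lrc : List Int :=
        ((PySem.List.enumerate line_to_seg).filter (fun q => q.2 == si)).flatMap
          (fun q => ((PySem.List.pyGet? lrc_lines_words q.1).getD []).map (·.1))
          -- .getD []: the none case is an IndexError in Python, excluded by Pre_
      let total : Int := all_lrc.length
      if total = 0 then []
      else
        let seg_wc : Int := fl.2 - fl.1 + 1
        (PySem.List.enumerate all_lrc).map
          (fun q => (q.2, [fl.1 + min (pyDivMulInt q.1 total seg_wc) (seg_wc - 1)]))

def distribute_words_within_segments_py_alt (line_to_seg : List Int) (lrc_lines_words : List (List (Int × String))) (seg_word_ranges : List (Int × Int)) : List (Int × List Int) :=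
  -- 'segs = list(dict.fromkeys(s for s in line_to_seg if s >= 0))'
  let segs : List Int := PySem.List.dedup (line_to_seg.filter (fun s => decide ((0 : Int) ≤ s)))
  -- 'pairs = []; for si in segs: … pairs.extend(…)'
  let pairs : List (Int × List Int) :=
    segs.foldl (fun acc si => acc ++ pvB_pairsOf line_to_seg lrc_lines_words seg_word_ranges si) []
  -- 'return dict(pairs)'
  (pairs.foldl (fun d p => d.insert p.1 p.2) (PySem.Dict.empty : PySem.Dict Int (List Int))).items

-- ===== PRECONDITION & SPEC =====
-- Pre_ holds exactly when the Python returns normally: every non-negative segment index is in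
-- range of seg_word_ranges (else IndexError), and every line of a live segment (first_wi >= 0)
-- is in range of lrc_lines_words (else IndexError).
def Pre_distribute_words_within_segments_py (line_to_seg : List Int) (lrc_lines_words : List (List (Int × String))) (seg_word_ranges : List (Int × Int)) : Prop :=
  ∀ li < line_to_seg.length,
    0 ≤ line_to_seg[li]! →
      line_to_seg[li]!.toNat < seg_word_ranges.length ∧
      (0 ≤ (seg_word_ranges[line_to_seg[li]!.toNat]!).1 → li < lrc_lines_words.length)
instance (line_to_seg : List Int) (lrc_lines_words : List (List (Int × String))) (seg_word_ranges : List (Int × Int)) : Decidable (Pre_distribute_words_within_segments_py line_to_seg lrc_lines_words seg_word_ranges) := by unfold Pre_distribute_words_within_segments_py; infer_instance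

def pvWitness_distribute_words_within_segments_py : List Int × (List (List (Int × String))) × (List (Int × Int)) :=
  ([0, -1, 1], [[(0, "a"), (1, "b")], [(2, "c")]], [(0, 2), (-1, -1)])

def Spec_distribute_words_within_segments_py (line_to_seg : List Int) (lrc_lines_words : List (List (Int × String))) (seg_word_ranges : List (Int × Int)) (out : List (Int × List Int)) : Prop := out = distribute_words_within_segments_py_alt line_to_seg lrc_lines_words seg_word_ranges
instance (line_to_seg : List Int) (lrc_lines_words : List (List (Int × String))) (seg_word_ranges : List (Int × Int)) (out : List (Int × List Int)) : Decidable (Spec_distribute_words_within_segments_py line_to_seg lrc_lines_words seg_word_ranges out) := by unfold Spec_distribute_words_within_segments_py; infer_instance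

-- ===== CLAIM (what is proved, stated in full; the proofs are below) =====
def Claim_equal_distribute_words_within_segments_py : Prop := ∀ (line_to_seg : List Int) (lrc_lines_words : List (List (Int × String))) (seg_word_ranges : List (Int × Int)), Dom_distribute_words_within_segments_py line_to_seg lrc_lines_words seg_word_ranges → Pre_distribute_words_within_segments_py line_to_seg lrc_lines_words seg_word_ranges → Spec_distribute_words_within_segments_py line_to_seg lrc_lines_words seg_word_ranges (distribute_words_within_segments_py line_to_seg lrc_lines_words seg_word_ranges)

-- ===== LEMMAS AND PROOFS =====
-- the line indices of segment k, in order
def pvLinesOf (line_to_seg : List Int) (k : Int) : List Int :=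
  ((PySem.List.enumerate line_to_seg).filter (fun q => q.2 == k)).map (·.1)

-- Phase 1: A's seg_to_lines dict, characterized.
lemma pvA_line_foldl_eq (lts : List Int) :
    (PySem.List.enumerate lts).foldl pvA_line PySem.Dict.empty =
      (((PySem.List.enumerate lts).filter (fun p => decide ((0 : Int) ≤ p.2))).map Prod.swap).foldl
        (fun (d : PySem.Dict Int (List Int)) (p : Int × Int) => d.modify p.1 [] (· ++ [p.2]))
        PySem.Dict.empty := by
  have h := PySem.List.foldl_ite_eq_foldl_filter (fun p : Int × Int => (0 : Int) ≤ p.2)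
    (fun (d : PySem.Dict Int (List Int)) (p : Int × Int) => d.modify p.2 [] (· ++ [p.1]))
    (PySem.List.enumerate lts) PySem.Dict.empty
  rw [List.foldl_map]
  exact h

lemma pvA_keys (lts : List Int) :
    ((PySem.List.enumerate lts).foldl pvA_line PySem.Dict.empty).keys =
      PySem.List.dedup (lts.filter (fun s => decide ((0 : Int) ≤ s))) := by
  rw [pvA_line_foldl_eq, PySem.Dict.keys_foldl_modify_key]
  have h1 : (((PySem.List.enumerate lts).filter (fun p => decide ((0 : Int) ≤ p.2))).map Prod.swap).map
      (fun p => p.1) = lts.filter (fun s => decide ((0 : Int) ≤ s)) := by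
    rw [List.map_map]
    have h3 := List.filter_map (l := PySem.List.enumerate lts) (f := fun p : Int × Int => p.2)
      (p := fun s => decide ((0 : Int) ≤ s))
    rw [PySem.List.map_snd_enumerate] at h3
    exact h3.symm
  rw [h1, PySem.List.dedup_eq_ofList]
  rfl

lemma pvA_nodup_keys (lts : List Int) :
    ((PySem.List.enumerate lts).foldl pvA_line PySem.Dict.empty).keys.Nodup := by
  rw [pvA_keys]
  exact PySem.List.nodup_dedup _

lemma pvA_getD (lts : List Int) (k : Int) (hk : (0 : Int) ≤ k) :
    ((PySem.List.enumerate lts).foldl pvA_line PySem.Dict.empty).getD k [] = pvLinesOf lts k := by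
  rw [pvA_line_foldl_eq, PySem.Dict.getD_foldl_modify_append]
  have h1 : (((PySem.List.enumerate lts).filter (fun p => decide ((0 : Int) ≤ p.2))).map
      Prod.swap).filter (fun p => p.1 == k) =
      (((PySem.List.enumerate lts).filter (fun p => decide ((0 : Int) ≤ p.2))).filter
        (fun p => p.2 == k)).map Prod.swap := by
    exact List.filter_map (l := (PySem.List.enumerate lts).filter (fun p => decide ((0 : Int) ≤ p.2)))
      (f := Prod.swap) (p := fun p : Int × Int => p.1 == k)
  rw [h1, List.filter_filter]
  have h2 : ((PySem.List.enumerate lts).filter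
        (fun p => (p.2 == k) && decide ((0 : Int) ≤ p.2))) =
      (PySem.List.enumerate lts).filter (fun p => p.2 == k) := by
    apply List.filter_congr
    intro p _
    by_cases hp : p.2 = k
    · subst hp; simp [hk]
    · simp [hp]
  rw [h2]
  unfold pvLinesOf
  simp [List.map_map]

lemma pvA_phase1 (lts : List Int) :
    ((PySem.List.enumerate lts).foldl pvA_line PySem.Dict.empty).items =
      (PySem.List.dedup (lts.filter (fun s => decide ((0 : Int) ≤ s)))).map
        (fun k => (k, pvLinesOf lts k)) := by
  rw [PySem.Dict.items_eq_map_keys _ (pvA_nodup_keys lts) [], pvA_keys]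
  apply List.map_congr_left
  intro k hkmem
  have hk : (0 : Int) ≤ k := by
    have := (PySem.List.mem_dedup _ _).1 hkmem
    have := List.mem_filter.1 this
    simpa using this.2
  rw [pvA_getD lts k hk]

-- Phase 2 step: A's per-segment body, applied to (k, pvLinesOf k), is a fold of inserts
-- over B's pair list for k.
lemma pvA_seg_eq (lts : List Int) (llw : List (List (Int × String))) (swr : List (Int × Int))
    (k : Int) (acc : PySem.Dict Int (List Int)) :
    pvA_seg llw swr acc (k, pvLinesOf lts k) =
      (pvB_pairsOf lts llw swr k).foldl (fun d p => d.insert p.1 p.2) acc := by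
  unfold pvA_seg pvB_pairsOf
  cases hg : PySem.List.pyGet? swr k with
  | none => rfl
  | some fl =>
    by_cases hfl : fl.1 < 0
    · simp only [hfl, if_true]
      rfl
    · simp only [hfl, if_false]
      have hall : (pvLinesOf lts k).foldl (fun acc li =>
            ((PySem.List.pyGet? llw li).getD []).foldl (fun a w => a ++ [w.1]) acc) [] =
          ((PySem.List.enumerate lts).filter (fun q => q.2 == k)).flatMap
            (fun q => ((PySem.List.pyGet? llw q.1).getD []).map (·.1)) := by
        have hfn : (fun (acc : List Int) (li : Int) =>
              ((PySem.List.pyGet? llw li).getD []).foldl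
                (fun (a : List Int) (w : Int × String) => a ++ [w.1]) acc) =
            (fun acc li => acc ++ ((PySem.List.pyGet? llw li).getD []).map (·.1)) := by
          funext acc li
          rw [PySem.List.foldl_append_singleton_eq_map]
        rw [hfn, PySem.List.foldl_append_eq_flatMap]
        unfold pvLinesOf
        rw [List.flatMap_map]
        rfl
      rw [hall]
      set all := ((PySem.List.enumerate lts).filter (fun q => q.2 == k)).flatMap
            (fun q => ((PySem.List.pyGet? llw q.1).getD []).map (·.1)) with hdefall
      by_cases ht : ((all.length : Int)) = 0
      · simp only [ht, if_true]
        rfl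
      · simp only [ht, if_false]
        rw [List.foldl_map]
        have hmax : max ((all.length : Int)) 1 = (all.length : Int) := by omega
        rw [hmax]

-- Phase 2: folding A's body over the characterized items = folding inserts over B's flat pairs.
lemma pvA_phase2 (lts : List Int) (llw : List (List (Int × String))) (swr : List (Int × Int)) :
    ∀ (segs : List Int) (acc : PySem.Dict Int (List Int)),
      (segs.map (fun k => (k, pvLinesOf lts k))).foldl (pvA_seg llw swr) acc =
        (segs.flatMap (pvB_pairsOf lts llw swr)).foldl (fun d p => d.insert p.1 p.2) acc := by
  intro segs
  induction segs with
  | nil => intro acc; rfl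
  | cons k segs ih =>
    intro acc
    simp only [List.map_cons, List.foldl_cons, List.flatMap_cons, List.foldl_append]
    rw [pvA_seg_eq lts llw swr k acc]
    exact ih _

-- ===== VERDICT (by name: the statement is the Claim_ definition above) =====
theorem distribute_words_within_segments_py_spec : Claim_equal_distribute_words_within_segments_py := by
  intro lts llw swr _hdom _hpre
  show (((PySem.List.enumerate lts).foldl pvA_line PySem.Dict.empty).items.foldl
      (pvA_seg llw swr) PySem.Dict.empty).items = _
  rw [pvA_phase1 lts, pvA_phase2 lts llw swr]
  show _ = (((PySem.List.dedup (lts.filter (fun s => decide ((0 : Int) ≤ s)))).foldl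
      (fun acc si => acc ++ pvB_pairsOf lts llw swr si) []).foldl
      (fun d p => d.insert p.1 p.2) PySem.Dict.empty).items
  rw [PySem.List.foldl_append_eq_flatMap]
  simp
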